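-- pv_equiv track=rewrite | github.com/prakirnakeshi/intern_assignment | assignment.py | transform_subtitles
-- ===== SOURCE A (Python) =====
-- def transform_subtitles(lines):
--     # Find the start of the Events section -
--     events_start_index = lines.index("[Events]\n")
--     events_format = lines[events_start_index + 1]
--     events = lines[events_start_index + 2:]
--
--     transformed_events = []
--
--     for i, event in enumerate(events):
--         #If the current event is the first one (i == 0), it adds a placeholder line for the previous line.
--         if i == 0:
--             transformed_events.append('Dialogue: 0,0:00:00.00,0:00:00.00,P,,0,0,0,,...\n')
--             #Otherwise, it adds the actual previous event, replacing Default with P to indicate it's the previous line.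
--         else:
--             prev_event = events[i - 1]
--             transformed_events.append(prev_event.replace('Default', 'P'))
--
--         # Add current event
--         transformed_events.append(event)
--
--         # If the current event is the last one (i == len(events) - 1), it adds a placeholder line for the next line.
--
--         if i == len(events) - 1:
--             transformed_events.append('Dialogue: 0,0:00:00.00,0:00:00.00,F,,0,0,0,,...\n')
--             # Else, it adds the actual next event, replacing Default with F to indicate it's the next line.
--         else:
--             next_event = events[i + 1]
--             transformed_events.append(next_event.replace('Default', 'F'))
--
--         transformed_events.append('\n')
--
--     return lines[:events_start_index + 2] + transformed_events
-- ===== SOURCE B (Python) =====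
-- def transform_subtitles(lines):
--     events_start_index = lines.index("[Events]\n")
--     _events_format = lines[events_start_index + 1]
--     events = lines[events_start_index + 2:]
--     placeholder_p = 'Dialogue: 0,0:00:00.00,0:00:00.00,P,,0,0,0,,...\n'
--     placeholder_f = 'Dialogue: 0,0:00:00.00,0:00:00.00,F,,0,0,0,,...\n'
--     prevs = [placeholder_p] + [e.replace('Default', 'P') for e in events[:-1]]
--     nexts = [e.replace('Default', 'F') for e in events[1:]] + [placeholder_f]
--     out = lines[:events_start_index + 2]
--     for p, e, n in zip(prevs, events, nexts):
--         out += [p, e, n, '\n']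
--     return out
-- ===== Notes on version B (the rewrite author's own statement) =====
-- stated objective: simpler
-- what changed: Instead of branching on first/last inside an indexed enumerate loop, B precomputes shifted prev/next context lists padded with the placeholders and emits each 4-line block from a single branch-free zip loop.
import Mathlib
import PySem

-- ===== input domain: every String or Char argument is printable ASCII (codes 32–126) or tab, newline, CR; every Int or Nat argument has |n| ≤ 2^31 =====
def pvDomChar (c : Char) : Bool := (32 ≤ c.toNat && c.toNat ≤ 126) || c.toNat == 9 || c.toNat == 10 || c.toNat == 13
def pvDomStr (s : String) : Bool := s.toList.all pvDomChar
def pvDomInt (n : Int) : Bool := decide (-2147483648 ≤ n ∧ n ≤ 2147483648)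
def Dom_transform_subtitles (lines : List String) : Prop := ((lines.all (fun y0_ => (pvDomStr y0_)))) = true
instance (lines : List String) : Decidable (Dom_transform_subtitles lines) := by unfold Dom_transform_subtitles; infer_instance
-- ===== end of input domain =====

-- B replaces A's indexed enumerate loop with first/last branches by precomputed, placeholder-padded
-- prev/next context lists consumed by one branch-free zip loop (objective: simpler).

def pvPlaceholderP : String := "Dialogue: 0,0:00:00.00,0:00:00.00,P,,0,0,0,,...\n"
def pvPlaceholderF : String := "Dialogue: 0,0:00:00.00,0:00:00.00,F,,0,0,0,,...\n"

-- ===== PORT A =====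
-- the enumerate loop of A: index i, remaining events; appends per-event blocks in order
def pvLoopA (events : List String) (i : Nat) (rest : List String) : List String :=
  match rest with
  | [] => []
  | event :: rest' =>
    (if i = 0 then [pvPlaceholderP]
     else [PySem.Str.replace (events.getD (i - 1) "") "Default" "P"]) ++
    [event] ++
    (if i = events.length - 1 then [pvPlaceholderF]
     else [PySem.Str.replace (events.getD (i + 1) "") "Default" "F"]) ++
    ["\n"] ++ pvLoopA events (i + 1) rest'

def transform_subtitles (lines : List String) : List String :=
  match PySem.List.index? lines "[Events]\n" with
  | none => []      -- lines.index raises ValueError: outside Pre_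
  | some events_start_index =>
    match PySem.List.pyGet? lines ((events_start_index : Int) + 1) with
    | none => []    -- lines[events_start_index + 1] raises IndexError: outside Pre_
    | some _events_format =>
      let events := lines.drop (events_start_index + 2)   -- lines[i+2:], nonneg bound
      lines.take (events_start_index + 2) ++ pvLoopA events 0 events

-- ===== PORT B =====
-- the zip loop of B: emits p, e, n, '\n' per triple
def pvZipLoop : List String → List String → List String → List String
  | p :: ps, e :: es, n :: ns => p :: e :: n :: "\n" :: pvZipLoop ps es ns
  | _, _, _ => []

def transform_subtitles_alt (lines : List String) : List String :=
  match PySem.List.index? lines "[Events]\n" with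
  | none => []      -- ValueError: outside Pre_
  | some i =>
    match PySem.List.pyGet? lines ((i : Int) + 1) with
    | none => []    -- IndexError: outside Pre_
    | some _fmt =>
      let events := lines.drop (i + 2)
      let prevs := pvPlaceholderP ::
        events.dropLast.map (fun e => PySem.Str.replace e "Default" "P")
      let nexts :=
        (events.drop 1).map (fun e => PySem.Str.replace e "Default" "F") ++ [pvPlaceholderF]
      lines.take (i + 2) ++ pvZipLoop prevs events nexts

-- ===== PRECONDITION & SPEC =====
-- A raises ValueError when "[Events]\n" is absent and IndexError when its first occurrence is the
-- last line (no format line follows); Pre_ admits exactly the inputs where A returns.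
def Pre_transform_subtitles (lines : List String) : Prop :=
  ((PySem.List.index? lines "[Events]\n").any (fun i => decide (i + 1 < lines.length))) = true
instance (lines : List String) : Decidable (Pre_transform_subtitles lines) := by
  unfold Pre_transform_subtitles; infer_instance

def pvWitness_transform_subtitles : List String :=
  ["[Events]\n", "Format: Text\n", "Dialogue: Default,a\n", "Dialogue: Default,b\n"]

def Spec_transform_subtitles (lines : List String) (out : List String) : Prop := out = transform_subtitles_alt lines
instance (lines : List String) (out : List String) : Decidable (Spec_transform_subtitles lines out) := by unfold Spec_transform_subtitles; infer_instance

-- ===== CLAIM (what is proved, stated in full; the proofs are below) =====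
def Claim_equal_transform_subtitles : Prop := ∀ (lines : List String), Dom_transform_subtitles lines → Pre_transform_subtitles lines → Spec_transform_subtitles lines (transform_subtitles lines)

-- ===== LEMMAS AND PROOFS =====

theorem pvZipLoop_nil (ps ns : List String) : pvZipLoop ps [] ns = [] := by
  cases ps <;> cases ns <;> rfl

-- Loop correspondence: A's indexed loop over the suffix events.drop i equals B's zip loop over
-- the i-suffixes of the padded context lists.
theorem pvLoop_eq (rest : List String) : ∀ (events : List String) (i : Nat),
    events.drop i = rest →
    pvLoopA events i rest =
      pvZipLoop
        ((pvPlaceholderP :: events.dropLast.map (fun e => PySem.Str.replace e "Default" "P")).drop i)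
        rest
        (((events.drop 1).map (fun e => PySem.Str.replace e "Default" "F") ++ [pvPlaceholderF]).drop i) := by
  induction rest with
  | nil => intro events i h; simp [pvLoopA, pvZipLoop_nil]
  | cons e rest' ih =>
    intro events i h
    have hi : i < events.length := by
      by_contra hge
      simp [List.drop_eq_nil_of_le (Nat.le_of_not_lt hge)] at h
    have hdrop := List.drop_eq_getElem_cons hi
    rw [h] at hdrop
    have he : events[i] = e := by
      have := hdrop; injection this with h1 h2; exact h1.symm
    have hrest' : events.drop (i + 1) = rest' := by
      have := hdrop; injection this with h1 h2; exact h2.symm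
    -- lengths of the padded lists
    have hlenP : (pvPlaceholderP :: events.dropLast.map (fun e => PySem.Str.replace e "Default" "P")).length = events.length := by
      simp; omega
    have hlenN : ((events.drop 1).map (fun e => PySem.Str.replace e "Default" "F") ++ [pvPlaceholderF]).length = events.length := by
      simp; omega
    have hiP : i < (pvPlaceholderP :: events.dropLast.map (fun e => PySem.Str.replace e "Default" "P")).length := by omega
    have hiN : i < ((events.drop 1).map (fun e => PySem.Str.replace e "Default" "F") ++ [pvPlaceholderF]).length := by omega
    rw [List.drop_eq_getElem_cons hiP, List.drop_eq_getElem_cons hiN]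
    have hP : (pvPlaceholderP :: events.dropLast.map (fun e => PySem.Str.replace e "Default" "P"))[i] =
        (if i = 0 then pvPlaceholderP
         else PySem.Str.replace (events.getD (i - 1) "") "Default" "P") := by
      rcases i with _ | j
      · rfl
      · have hj : j < events.dropLast.length := by simp; omega
        simp [List.getElem_cons_succ, List.getElem_dropLast,
          List.getD_eq_getElem?_getD, List.getElem?_eq_getElem (by omega : j < events.length)]
    have hN : (((events.drop 1).map (fun e => PySem.Str.replace e "Default" "F") ++ [pvPlaceholderF]))[i] =
        (if i = events.length - 1 then pvPlaceholderF
         else PySem.Str.replace (events.getD (i + 1) "") "Default" "F") := by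
      by_cases hlast : i = events.length - 1
      · have : ((events.drop 1).map (fun e => PySem.Str.replace e "Default" "F")).length = i := by
          simp; omega
        rw [List.getElem_append_right (by omega)]
        simp [hlast]
      · have hin : i < ((events.drop 1).map (fun e => PySem.Str.replace e "Default" "F")).length := by
          simp; omega
        rw [List.getElem_append_left hin]
        have h1 : i + 1 < events.length := by omega
        simp [hlast, List.getD_eq_getElem?_getD, List.getElem?_eq_getElem h1]
    rw [hP, hN]
    show pvLoopA events i (e :: rest') = _
    rw [pvLoopA, ih events (i + 1) hrest']
    split_ifs <;> simp [pvZipLoop]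

-- ===== VERDICT (by name: the statement is the Claim_ definition above) =====
theorem transform_subtitles_spec : Claim_equal_transform_subtitles := by
  intro lines _ _
  unfold Spec_transform_subtitles transform_subtitles transform_subtitles_alt
  cases hidx : PySem.List.index? lines "[Events]\n" with
  | none => rfl
  | some i =>
    dsimp only
    cases hget : PySem.List.pyGet? lines ((i : Int) + 1) with
    | none => rfl
    | some fmt =>
      dsimp only
      rw [pvLoop_eq (lines.drop (i + 2)) (lines.drop (i + 2)) 0 rfl]
      simp only [List.drop_zero]
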